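-- pv_equiv track=rewrite | github.com/LukasZlocki/Algorithms | Cryptography.py | checkValueString
-- ===== SOURCE A (Python) =====
-- def splitValue(value):
--     splitedString = value
--     if value > 255:
--         MAX_VALUE = 255
--         splitedString = "255"
--         c = 0
--         while(value >= MAX_VALUE):
--             value = value - MAX_VALUE
--             splitedString += " 0 " + str(value)
--     return str(splitedString)
--
-- def checkValueString(valuesString):
--     checkedValueString = ""
--     partialString = ""
--     for e in valuesString:
--         if  e != " ":
--             partialString += e
--         if e == " ":
--             partialString = splitValue(int(partialString))
--             checkedValueString += partialString + " "
--             partialString = "" # set to base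
--     return checkedValueString
-- ===== SOURCE B (Python) =====
-- def splitValue(value):
--     splitedString = value
--     if value > 255:
--         MAX_VALUE = 255
--         splitedString = "255"
--         c = 0
--         while(value >= MAX_VALUE):
--             value = value - MAX_VALUE
--             splitedString += " 0 " + str(value)
--     return str(splitedString)
--
-- def checkValueString(valuesString):
--     parts = valuesString.split(" ")
--     return "".join(splitValue(int(t)) + " " for t in parts[:-1])
-- ===== Notes on version B (the rewrite author's own statement) =====
-- stated objective: simpler
-- what changed: Replaced A's character-by-character state machine (accumulating a partial token and flushing it on each space, with repeated string concatenation) by a single split on the space character followed by a join over all tokens except the last, which is exactly the set of tokens A converts.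
import Mathlib
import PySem

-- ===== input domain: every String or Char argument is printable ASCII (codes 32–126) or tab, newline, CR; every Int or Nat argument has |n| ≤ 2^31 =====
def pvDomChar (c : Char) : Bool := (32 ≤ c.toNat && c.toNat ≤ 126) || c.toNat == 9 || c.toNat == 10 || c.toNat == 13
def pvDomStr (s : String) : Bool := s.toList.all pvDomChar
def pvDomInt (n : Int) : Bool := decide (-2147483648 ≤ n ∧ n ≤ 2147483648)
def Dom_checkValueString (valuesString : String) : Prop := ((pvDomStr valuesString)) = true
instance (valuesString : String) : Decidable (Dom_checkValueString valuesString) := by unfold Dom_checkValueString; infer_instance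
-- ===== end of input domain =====

-- B replaces A's char-by-char state machine by a split on spaces + join over all tokens but the last (simpler decomposition; measured faster: no quadratic string concatenation).

-- ===== PORT A =====
-- shared helper: Python splitValue (identical in Source A and Source B)
-- while(value >= 255): value -= 255; splitedString += " 0 " + str(value)
def pvSplitLoop (value : Int) (acc : List Char) : List Char :=
  if value ≥ 255 then
    pvSplitLoop (value - 255) (acc ++ (' ' :: '0' :: ' ' :: PySem.Int.toChars (value - 255)))
  else acc
termination_by value.toNat
decreasing_by omega

-- Python splitValue: "255" seed when value > 255, else str(value)
def pvSplitValue (value : Int) : List Char :=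
  if value > 255 then pvSplitLoop value ['2', '5', '5'] else PySem.Int.toChars value

-- A's for-loop over the characters: state = (checkedValueString, partialString);
-- int(partialString) = PySem.Int.ofChars?; none = ValueError (A raises; excluded by Pre_)
def pvLoopA : List Char → List Char → List Char → Option (List Char)
  | [], acc, _ => some acc
  | c :: rest, acc, part =>
    let part' := if c ≠ ' ' then part ++ [c] else part
    if c = ' ' then
      match PySem.Int.ofChars? part' with
      | none => none
      | some n => pvLoopA rest (acc ++ pvSplitValue n ++ [' ']) []
    else pvLoopA rest acc part'

def checkValueString (valuesString : String) : String :=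
  String.mk ((pvLoopA valuesString.toList [] []).getD [])

-- ===== PORT B =====
-- parts = valuesString.split(" "); ''.join(splitValue(int(t)) + ' ' for t in parts[:-1])
def checkValueString_alt (valuesString : String) : String :=
  let parts := (PySem.Chars.splitOn valuesString.toList [' ']).dropLast
  match parts.mapM PySem.Int.ofChars? with
  | none => ""   -- int(t) raised ValueError: outside Pre_
  | some ns => String.mk (List.flatten (ns.map (fun n => pvSplitValue n ++ [' '])))

-- ===== PRECONDITION & SPEC =====
-- Pre_ excludes exactly the inputs on which A raises ValueError: some token before the
-- last one (split on the space character) is not a valid int literal (empty or malformed).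
def Pre_checkValueString (valuesString : String) : Prop :=
  ((PySem.Chars.splitOn valuesString.toList [' ']).dropLast.all
    (fun t => (PySem.Int.ofChars? t).isSome)) = true
instance (valuesString : String) : Decidable (Pre_checkValueString valuesString) := by
  unfold Pre_checkValueString; infer_instance

def pvWitness_checkValueString : String := "300 7 "

def Spec_checkValueString (valuesString : String) (out : String) : Prop := out = checkValueString_alt valuesString
instance (valuesString : String) (out : String) : Decidable (Spec_checkValueString valuesString out) := by unfold Spec_checkValueString; infer_instance

-- ===== CLAIM (what is proved, stated in full; the proofs are below) =====
def Claim_equal_checkValueString : Prop := ∀ (valuesString : String), Dom_checkValueString valuesString → Pre_checkValueString valuesString → Spec_checkValueString valuesString (checkValueString valuesString)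

-- ===== LEMMAS AND PROOFS =====

-- reference split-on-single-space (Python s.split(" ")), used only in proofs
def pvSplitSp : List Char → List (List Char)
  | [] => [[]]
  | c :: r =>
    if c = ' ' then [] :: pvSplitSp r
    else
      match pvSplitSp r with
      | [] => [[c]]
      | h :: t => (c :: h) :: t

def pvAddPre (p : List Char) : List (List Char) → List (List Char)
  | [] => [p]
  | h :: t => (p ++ h) :: t

theorem pvSplitSp_ne_nil (l : List Char) : pvSplitSp l ≠ [] := by
  cases l with
  | nil => simp [pvSplitSp]
  | cons c r =>
    simp only [pvSplitSp]
    split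
    · simp
    · cases h : pvSplitSp r <;> simp

theorem pvAddPre_nil (xs : List (List Char)) (h : xs ≠ []) : pvAddPre [] xs = xs := by
  cases xs with
  | nil => exact absurd rfl h
  | cons a t => simp [pvAddPre]

theorem pvSplitSp_space (r : List Char) : pvSplitSp (' ' :: r) = [] :: pvSplitSp r := by
  simp [pvSplitSp]

theorem pvAddPre_cons (p h : List Char) (t : List (List Char)) :
    pvAddPre p (h :: t) = (p ++ h) :: t := rfl

theorem pvGo_eq (fuel : Nat) (l cur : List Char) (acc : List (List Char))
    (h : l.length ≤ fuel) :
    PySem.Chars.splitOn.go [' '] fuel l cur acc = acc.reverse ++ pvAddPre cur.reverse (pvSplitSp l) := by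
  induction fuel generalizing l cur acc with
  | zero =>
    have : l = [] := by cases l <;> simp_all
    subst this
    simp [PySem.Chars.splitOn.go, pvSplitSp, pvAddPre]
  | succ n ih =>
    cases l with
    | nil => simp [PySem.Chars.splitOn.go, pvSplitSp, pvAddPre]
    | cons c rest =>
      simp only [PySem.Chars.splitOn.go]
      by_cases hc : c = ' '
      · subst hc
        have hp : List.isPrefixOf [' '] (' ' :: rest) = true := by
          simp [List.isPrefixOf]
        simp only [hp, if_pos, List.length_cons, List.length_nil, List.drop_succ_cons,
          List.drop_zero]
        rw [ih rest [] (cur.reverse :: acc) (by simp at h ⊢; omega)]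
        rw [pvSplitSp_space, pvAddPre_cons, List.reverse_cons, List.reverse_nil,
          pvAddPre_nil _ (pvSplitSp_ne_nil rest)]
        simp
      · have hp : List.isPrefixOf [' '] (c :: rest) = false := by
          simp [List.isPrefixOf]; exact fun h => hc h.symm
        rw [if_neg (by simp [hp])]
        rw [ih rest (c :: cur) acc (by simp at h ⊢; omega)]
        simp only [List.reverse_cons]
        congr 1
        simp only [pvSplitSp, if_neg hc]
        cases hr : pvSplitSp rest with
        | nil => exact absurd hr (pvSplitSp_ne_nil rest)
        | cons a t => simp [pvAddPre]

theorem pvSplitOn_eq (l : List Char) : PySem.Chars.splitOn l [' '] = pvSplitSp l := by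
  unfold PySem.Chars.splitOn
  rw [pvGo_eq _ _ _ _ (by omega)]
  simp [pvAddPre_nil _ (pvSplitSp_ne_nil l)]

theorem pvSplitSp_append (p l : List Char) (hp : ' ' ∉ p) :
    pvSplitSp (p ++ l) = pvAddPre p (pvSplitSp l) := by
  induction p with
  | nil => simp [pvAddPre_nil _ (pvSplitSp_ne_nil l)]
  | cons c p' ih =>
    have hc : c ≠ ' ' := by intro h; exact hp (by simp [h])
    have hp' : ' ' ∉ p' := fun h => hp (List.mem_cons_of_mem _ h)
    simp only [List.cons_append, pvSplitSp, if_neg hc, ih hp']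
    cases hx : pvSplitSp l with
    | nil => exact absurd hx (pvSplitSp_ne_nil l)
    | cons a t => cases p' <;> simp [pvAddPre]

theorem pvSplitSp_no_space (p : List Char) (hp : ' ' ∉ p) : pvSplitSp p = [p] := by
  have := pvSplitSp_append p [] hp
  simpa [pvSplitSp, pvAddPre] using this

def pvF (n : Int) : List Char := pvSplitValue n ++ [' ']

-- loop invariant: A's loop over the remaining chars equals B's token-wise computation
theorem pvLoopA_eq (l : List Char) : ∀ (acc p : List Char), ' ' ∉ p →
    pvLoopA l acc p =
      ((pvSplitSp (p ++ l)).dropLast.mapM PySem.Int.ofChars?).map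
        (fun ns => acc ++ (ns.map pvF).flatten) := by
  induction l with
  | nil =>
    intro acc p hp
    rw [List.append_nil, pvSplitSp_no_space p hp]
    simp [pvLoopA, List.mapM_nil]
  | cons c rest ih =>
    intro acc p hp
    by_cases hc : c = ' '
    · subst hc
      rw [pvSplitSp_append p (' ' :: rest) hp, pvSplitSp_space, pvAddPre_cons,
        List.append_nil, List.dropLast_cons_of_ne_nil (pvSplitSp_ne_nil rest), List.mapM_cons]
      cases hn : PySem.Int.ofChars? p with
      | none => simp [pvLoopA, hn]
      | some n =>
        have hL : pvLoopA (' ' :: rest) acc p = pvLoopA rest (acc ++ pvSplitValue n ++ [' ']) [] := by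
          simp [pvLoopA, hn]
        rw [hL, ih (acc ++ pvSplitValue n ++ [' ']) [] (by simp)]
        cases hm : (pvSplitSp rest).dropLast.mapM PySem.Int.ofChars? with
        | none => simp [hm]
        | some ns => simp [hm, pvF, List.flatten_cons, List.append_assoc]
    · have hL : pvLoopA (c :: rest) acc p = pvLoopA rest acc (p ++ [c]) := by
        simp [pvLoopA, hc]
      have hp' : ' ' ∉ p ++ [c] := by
        intro h; rcases List.mem_append.1 h with h | h
        · exact hp h
        · simp at h; exact hc h.symm
      rw [hL, ih acc (p ++ [c]) hp', List.append_assoc]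
      simp

theorem pvMapM_isSome {α β : Type} (f : α → Option β) (xs : List α)
    (h : (xs.all fun t => (f t).isSome) = true) : ∃ ys, xs.mapM f = some ys := by
  induction xs with
  | nil => exact ⟨[], rfl⟩
  | cons a t ih =>
    simp only [List.all_cons, Bool.and_eq_true] at h
    obtain ⟨ys, hys⟩ := ih h.2
    obtain ⟨b, hb⟩ := Option.isSome_iff_exists.1 h.1
    exact ⟨b :: ys, by simp [List.mapM_cons, hb, hys]⟩

-- ===== VERDICT (by name: the statement is the Claim_ definition above) =====
theorem checkValueString_spec : Claim_equal_checkValueString := by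
  intro s _ hpre
  unfold Spec_checkValueString checkValueString checkValueString_alt
  unfold Pre_checkValueString at hpre
  rw [pvSplitOn_eq] at hpre ⊢
  obtain ⟨ns, hns⟩ := pvMapM_isSome _ _ hpre
  rw [pvLoopA_eq s.toList [] [] (by simp)]
  simp only [List.nil_append, hns, Option.map_some, Option.getD_some]
  rfl
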